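-- pv_equiv track=rewrite | github.com/olivercalder/sonic-signatures | Preprocessing/phonemes.py | nest_dict_by_play
-- ===== SOURCE A (Python) =====
-- def nest_dict_by_play(phoneme_dict):
--     phoneme_dict_nested = {}
--     for char in phoneme_dict:
--         play = char.split('_')[0]
--         if play not in phoneme_dict_nested:
--             phoneme_dict_nested[play] = {}
--         phoneme_dict_nested[play][char] = phoneme_dict[char]
--     return phoneme_dict_nested
-- ===== SOURCE B (Python) =====
-- def nest_dict_by_play(phoneme_dict):
--     plays = []
--     for char in phoneme_dict:
--         play = char.split('_')[0]
--         if play not in plays: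
--             plays.append(play)
--     return {play: {char: phoneme_dict[char]
--                    for char in phoneme_dict
--                    if char.split('_')[0] == play}
--             for play in plays}
-- ===== Notes on version B (the rewrite author's own statement) =====
-- stated objective: alternative
-- what changed: B first collects the distinct play prefixes in order of first occurrence and then builds each play's inner dict with one filtering comprehension per play, instead of A's single pass that mutates a nested dict incrementally.
import Mathlib
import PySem

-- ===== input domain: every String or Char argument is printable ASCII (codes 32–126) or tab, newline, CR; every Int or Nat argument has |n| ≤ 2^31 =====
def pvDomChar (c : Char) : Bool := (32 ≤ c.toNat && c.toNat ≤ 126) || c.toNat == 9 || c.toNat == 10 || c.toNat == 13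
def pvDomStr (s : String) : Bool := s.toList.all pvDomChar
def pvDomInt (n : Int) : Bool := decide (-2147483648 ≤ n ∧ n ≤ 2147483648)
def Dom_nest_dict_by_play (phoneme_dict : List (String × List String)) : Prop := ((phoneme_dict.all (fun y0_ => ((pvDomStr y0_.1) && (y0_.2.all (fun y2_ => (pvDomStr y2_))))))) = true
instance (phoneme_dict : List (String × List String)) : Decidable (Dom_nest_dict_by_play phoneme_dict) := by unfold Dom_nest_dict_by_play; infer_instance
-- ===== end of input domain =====

-- B replaces A's one-pass nested-dict mutation by "collect distinct play prefixes, then one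
-- filtering comprehension per play" (alternative decomposition, same results).


-- char.split('_')[0]: split with a nonempty separator always returns `some` of a nonempty
-- list, so the `[0]` indexing cannot raise and is exactly the head.
def pvPlayOf (c : String) : String := ((PySem.Str.split? c "_").getD []).headD ""

-- ===== PORT A =====
-- `phoneme_dict[char]` with char drawn from the dict's own keys cannot raise, so `getD` with
-- an arbitrary default ([]) is exact; the default is never used.
def nest_dict_by_play (phoneme_dict : List (String × List String)) : List (String × List (String × List String)) :=
  let d := PySem.Dict.mk phoneme_dict
  let nested := d.keys.foldl (fun nested char =>
    let play := pvPlayOf char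
    let nested := if nested.contains play then nested else nested.insert play PySem.Dict.empty
    nested.modify play PySem.Dict.empty (fun inner => inner.insert char (d.getD char []))) PySem.Dict.empty
  nested.items.map (fun p => (p.1, p.2.items))

-- ===== PORT B =====
-- the two dict comprehensions of Source B: keys of the inner one are distinct (Pre_), so the
-- comprehension is exactly a filter+map; the outer one ranges over the distinct plays.
def nest_dict_by_play_alt (phoneme_dict : List (String × List String)) : List (String × List (String × List String)) :=
  let d := PySem.Dict.mk phoneme_dict
  let plays := d.keys.foldl (fun ps char =>
    let play := pvPlayOf char
    if play ∈ ps then ps else ps ++ [play]) []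
  plays.map (fun play => (play,
    (d.keys.filter (fun char => pvPlayOf char == play)).map (fun char => (char, d.getD char []))))

-- ===== PRECONDITION & SPEC =====
-- Pre_ excludes association lists with duplicate keys: A's argument is a Python dict, whose
-- keys are unique by construction, so no input A actually accepts is excluded.
def Pre_nest_dict_by_play (phoneme_dict : List (String × List String)) : Prop :=
  (phoneme_dict.map Prod.fst).Nodup
instance (phoneme_dict : List (String × List String)) : Decidable (Pre_nest_dict_by_play phoneme_dict) := by unfold Pre_nest_dict_by_play; infer_instance

def pvWitness_nest_dict_by_play : (List (String × List String)) :=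
  [("Ham_a", ["HH", "AE"]), ("Ham_b", ["B"]), ("Lr_a", ["L"])]

def Spec_nest_dict_by_play (phoneme_dict : List (String × List String)) (out : List (String × List (String × List String))) : Prop := out = nest_dict_by_play_alt phoneme_dict
instance (phoneme_dict : List (String × List String)) (out : List (String × List (String × List String))) : Decidable (Spec_nest_dict_by_play phoneme_dict out) := by unfold Spec_nest_dict_by_play; infer_instance

-- ===== CLAIM (what is proved, stated in full; the proofs are below) =====
def Claim_equal_nest_dict_by_play : Prop := ∀ (phoneme_dict : List (String × List String)), Dom_nest_dict_by_play phoneme_dict → Pre_nest_dict_by_play phoneme_dict → Spec_nest_dict_by_play phoneme_dict (nest_dict_by_play phoneme_dict)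

-- ===== LEMMAS AND PROOFS =====

-- the distinct plays of ks, in order of first occurrence (B's first loop, generalized)
def pvPlays (ks : List String) : List String :=
  ks.foldl (fun ps c => if pvPlayOf c ∈ ps then ps else ps ++ [pvPlayOf c]) []

-- the inner dict A accumulates for play p after processing ks, as a literal Dict
def pvInner (f : String → List String) (ks : List String) (p : String) : PySem.Dict String (List String) :=
  PySem.Dict.mk ((ks.filter (fun c => pvPlayOf c == p)).map (fun c => (c, f c)))

lemma pvPlays_append (ks : List String) (c : String) :
    pvPlays (ks ++ [c]) =
      if pvPlayOf c ∈ pvPlays ks then pvPlays ks else pvPlays ks ++ [pvPlayOf c] := by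
  simp [pvPlays, List.foldl_append]

lemma mem_pvPlays (ks : List String) (p : String) :
    p ∈ pvPlays ks ↔ ∃ c ∈ ks, pvPlayOf c = p := by
  induction ks using List.reverseRecOn generalizing p with
  | nil => simp [pvPlays]
  | append_singleton ks c ih =>
      rw [pvPlays_append]
      by_cases h : pvPlayOf c ∈ pvPlays ks
      · rw [if_pos h, ih]
        constructor
        · rintro ⟨c', hc', rfl⟩; exact ⟨c', by simp [hc'], rfl⟩
        · rintro ⟨c', hc', rfl⟩
          rcases List.mem_append.1 hc' with h' | h'
          · exact ⟨c', h', rfl⟩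
          · rw [List.mem_singleton] at h'; subst h'
            exact (ih _).1 h
      · rw [if_neg h]
        constructor
        · intro hp
          rcases List.mem_append.1 hp with hp | hp
          · rcases (ih p).1 hp with ⟨c', hc', rfl⟩
            exact ⟨c', by simp [hc'], rfl⟩
          · rw [List.mem_singleton] at hp; subst hp
            exact ⟨c, by simp, rfl⟩
        · rintro ⟨c', hc', rfl⟩
          rcases List.mem_append.1 hc' with h' | h'
          · exact List.mem_append.2 (Or.inl ((ih _).2 ⟨c', h', rfl⟩))
          · rw [List.mem_singleton] at h'; subst h'
            exact List.mem_append.2 (Or.inr (by simp))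

lemma nodup_pvPlays (ks : List String) : (pvPlays ks).Nodup := by
  induction ks using List.reverseRecOn with
  | nil => exact List.nodup_nil
  | append_singleton ks c ih =>
      rw [pvPlays_append]
      split_ifs with h
      · exact ih
      · exact List.Nodup.append ih (List.nodup_singleton _) (by
          intro a ha hb; simp at hb; subst hb; exact h ha)

-- one step of A's loop on an accumulator of the invariant shape
lemma pvStep_invariant (f : String → List String) (ks : List String) (c : String)
    (hc : c ∉ ks) :
    (((pvPlays ks).map (fun p => (p, pvInner f ks p)) : List (String × PySem.Dict String (List String))) |>
      (fun items =>
        let D : PySem.Dict String (PySem.Dict String (List String)) := PySem.Dict.mk items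
        let play := pvPlayOf c
        let D2 := if D.contains play then D else D.insert play PySem.Dict.empty
        (D2.modify play PySem.Dict.empty (fun inner => inner.insert c (f c))).items))
    = (pvPlays (ks ++ [c])).map (fun p => (p, pvInner f (ks ++ [c]) p)) := by
  simp only []
  set q := pvPlayOf c with hq
  have hkeys : (PySem.Dict.mk ((pvPlays ks).map (fun p => (p, pvInner f ks p)))).keys = pvPlays ks := by
    simp [PySem.Dict.keys, List.map_map, Function.comp_def]
  have hcontains : (PySem.Dict.mk ((pvPlays ks).map (fun p => (p, pvInner f ks p)))).contains q
      = decide (q ∈ pvPlays ks) := by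
    rw [PySem.Dict.contains_eq_decide_mem_keys, hkeys]
  have hinner_append : ∀ p, pvInner f (ks ++ [c]) p
      = PySem.Dict.mk (((ks.filter (fun c' => pvPlayOf c' == p)).map (fun c' => (c', f c')))
          ++ (if q = p then [(c, f c)] else [])) := by
    intro p
    simp only [pvInner, List.filter_append, List.map_append]
    congr 1
    by_cases h : q = p
    · simp [List.filter, h, hq.symm.trans h]
    · have : (pvPlayOf c == p) = false := by simp [← hq, h]
      simp [List.filter, this, h]
  by_cases hmem : q ∈ pvPlays ks
  · -- play already present: D2 = D, modify rewrites the q entry in place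
    rw [pvPlays_append, if_pos hmem]
    have hcont : (PySem.Dict.mk ((pvPlays ks).map (fun p => (p, pvInner f ks p)))).contains q = true := by
      rw [hcontains]; simpa using hmem
    simp only [hcont, if_true, PySem.Dict.modify]
    have hgetD : (PySem.Dict.mk ((pvPlays ks).map (fun p => (p, pvInner f ks p)))).getD q PySem.Dict.empty
        = pvInner f ks q := by
      apply PySem.Dict.getD_of_mem_items
      · exact List.mem_map.2 ⟨q, hmem, rfl⟩
      · rw [hkeys]; exact nodup_pvPlays ks
    rw [hgetD, PySem.Dict.items_insert_of_contains _ _ hcont]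
    simp only [List.map_map]
    apply List.map_congr_left
    intro p hp
    by_cases hpq : p = q
    · subst hpq
      simp only [Function.comp, beq_self_eq_true, if_true]
      have hinner_contains : (pvInner f ks q).contains c = false := by
        rw [PySem.Dict.contains_eq_decide_mem_keys]
        simp only [pvInner, PySem.Dict.keys, List.map_map, decide_eq_false_iff_not]
        intro hmemc
        rcases List.mem_map.1 hmemc with ⟨c', hc', hcc⟩
        simp only [Function.comp] at hcc
        exact hc (List.mem_of_mem_filter (hcc ▸ hc'))
      rw [hinner_append q, if_pos rfl]
      unfold PySem.Dict.insert
      rw [hinner_contains]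
      simp [pvInner]
    · have hne : ¬ q = p := fun h => hpq h.symm
      have hbq : (p == q) = false := by simpa using hpq
      simp only [Function.comp, hbq, Bool.false_eq_true, if_false]
      rw [hinner_append p, if_neg hne]
      simp [pvInner]
  · -- new play: D2 appends (q, {}), modify then fills it with {c: f c}
    rw [pvPlays_append, if_neg hmem]
    have hcont : (PySem.Dict.mk ((pvPlays ks).map (fun p => (p, pvInner f ks p)))).contains q = false := by
      rw [hcontains]; simpa using hmem
    simp only [hcont, Bool.false_eq_true, if_false, PySem.Dict.modify]
    have hfilter_nil : ks.filter (fun c' => pvPlayOf c' == q) = [] := by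
      apply List.filter_eq_nil_iff.2
      intro c' hc' hbeq
      exact hmem ((mem_pvPlays ks q).2 ⟨c', hc', by simpa using hbeq⟩)
    have hins : (PySem.Dict.mk ((pvPlays ks).map (fun p => (p, pvInner f ks p)))).insert q PySem.Dict.empty
        = PySem.Dict.mk (((pvPlays ks).map (fun p => (p, pvInner f ks p))) ++ [(q, PySem.Dict.empty)]) := by
      unfold PySem.Dict.insert
      rw [hcont]; simp
    rw [hins]
    have hcont2 : (PySem.Dict.mk (((pvPlays ks).map (fun p => (p, pvInner f ks p))) ++ [(q, PySem.Dict.empty)])).contains q = true := by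
      rw [PySem.Dict.contains_eq_decide_mem_keys]
      simp [PySem.Dict.keys]
    have hgetD2 : (PySem.Dict.mk (((pvPlays ks).map (fun p => (p, pvInner f ks p))) ++ [(q, PySem.Dict.empty)])).getD q PySem.Dict.empty
        = PySem.Dict.empty := by
      apply PySem.Dict.getD_of_mem_items
      · simp
      · simp only [PySem.Dict.keys, List.map_append, List.map_map]
        refine List.Nodup.append ?_ (by simp) ?_
        · simpa [List.map_map, Function.comp_def] using nodup_pvPlays ks
        · intro a ha hb
          simp only [List.mem_map, Function.comp] at ha
          rcases ha with ⟨p, hp, rfl⟩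
          simp at hb; subst hb; exact hmem hp
    rw [hgetD2, PySem.Dict.items_insert_of_contains _ _ hcont2]
    simp only [List.map_append, List.map_map, List.map_cons, List.map_nil]
    have hempty_ins : PySem.Dict.empty.insert c (f c) = PySem.Dict.mk [(c, f c)] := by
      unfold PySem.Dict.insert
      simp [PySem.Dict.empty, PySem.Dict.contains]
    congr 1
    · apply List.map_congr_left
      intro p hp
      have hne : ¬ q = p := fun h => hmem (by rw [h]; exact hp)
      have hpq : (p == q) = false := by
        simp only [beq_eq_false_iff_ne, ne_eq]
        exact fun h => hne h.symm
      simp only [Function.comp, hpq, Bool.false_eq_true, if_false]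
      rw [hinner_append p, if_neg hne]
      simp [pvInner]
    · simp only [beq_self_eq_true, if_true, List.cons.injEq, and_true]
      rw [hinner_append q, if_pos rfl, hfilter_nil, hempty_ins]
      simp [hq]

-- A's whole loop produces exactly B's grouped structure
lemma foldA_items (f : String → List String) (ks : List String) (h : ks.Nodup) :
    (ks.foldl (fun nested char =>
        let play := pvPlayOf char
        let nested := if nested.contains play then nested else nested.insert play PySem.Dict.empty
        nested.modify play PySem.Dict.empty (fun inner => inner.insert char (f char)))
      PySem.Dict.empty).items
    = (pvPlays ks).map (fun p => (p, pvInner f ks p)) := by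
  induction ks using List.reverseRecOn with
  | nil => simp [pvPlays, PySem.Dict.empty]
  | append_singleton ks c ih =>
      have hks : ks.Nodup := (List.nodup_append.1 h).1
      have hc : c ∉ ks := by
        intro hmem
        exact List.disjoint_of_nodup_append h hmem (by simp)
      rw [List.foldl_append]
      have := pvStep_invariant f ks c hc
      simp only [List.foldl_cons, List.foldl_nil]
      have hD : (ks.foldl (fun nested char =>
          let play := pvPlayOf char
          let nested := if nested.contains play then nested else nested.insert play PySem.Dict.empty
          nested.modify play PySem.Dict.empty (fun inner => inner.insert char (f char)))
        PySem.Dict.empty) = PySem.Dict.mk ((pvPlays ks).map (fun p => (p, pvInner f ks p))) := by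
        apply PySem.Dict.ext; exact ih hks
      rw [hD]
      exact this

-- ===== VERDICT (by name: the statement is the Claim_ definition above) =====
theorem nest_dict_by_play_spec : Claim_equal_nest_dict_by_play := by
  intro pd _ hpre
  unfold Spec_nest_dict_by_play nest_dict_by_play nest_dict_by_play_alt
  simp only []
  have hkeys_nodup : (PySem.Dict.mk pd).keys.Nodup := by
    simpa [PySem.Dict.keys] using hpre
  rw [foldA_items (fun char => (PySem.Dict.mk pd).getD char []) (PySem.Dict.mk pd).keys hkeys_nodup]
  simp only [List.map_map]
  apply List.map_congr_left
  intro p hp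
  simp [pvInner]
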